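-- pv_equiv track=rewrite | github.com/Rosalia-Labs/sensos-server | docker/controller/admin_ui.py | parse_wireguard_peers
-- ===== SOURCE A (Python) =====
-- def parse_wireguard_peers(output: str) -> list[dict[str, str]]:
--     lines = output.strip().splitlines()
--     peers: list[dict[str, str]] = []
--     current_peer: dict[str, str] = {}
--     skip_interface = True
--     for line in lines:
--         line = line.strip()
--         if skip_interface:
--             if line.startswith("peer:"):
--                 skip_interface = False
--             else:
--                 continue
--         if line.startswith("peer:"):
--             if current_peer:
--                 peers.append(current_peer)
--             current_peer = {"public_key": line.split(":", 1)[1].strip()}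
--         elif ":" in line:
--             key, value = map(str.strip, line.split(":", 1))
--             current_peer[key] = value
--     if current_peer:
--         peers.append(current_peer)
--     return peers
-- ===== SOURCE B (Python) =====
-- def _peer_dict(block):
--     peer = {"public_key": block[0].split(":", 1)[1].strip()}
--     for ln in block[1:]:
--         if ":" in ln:
--             k, v = ln.split(":", 1)
--             peer[k.strip()] = v.strip()
--     return peer
--
--
-- def parse_wireguard_peers(output: str) -> list[dict[str, str]]:
--     lines = [ln.strip() for ln in output.strip().splitlines()]
--     # phase 1: drop everything before the first "peer:" line
--     while lines and not lines[0].startswith("peer:"):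
--         lines = lines[1:]
--     # phase 2: partition into blocks, each starting at a "peer:" line
--     blocks = []
--     i = 0
--     while i < len(lines):
--         j = i + 1
--         while j < len(lines) and not lines[j].startswith("peer:"):
--             j += 1
--         blocks.append(lines[i:j])
--         i = j
--     # phase 3: map each block to its dict
--     return [_peer_dict(b) for b in blocks]
-- ===== Notes on version B (the rewrite author's own statement) =====
-- stated objective: simpler
-- what changed: Replaced A's single loop with skip_interface/current_peer flag-and-accumulator state by three separate phases: drop lines before the first 'peer:' line, partition the rest into blocks each starting at a 'peer:' line, then map each block to its dict.
import Mathlib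
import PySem

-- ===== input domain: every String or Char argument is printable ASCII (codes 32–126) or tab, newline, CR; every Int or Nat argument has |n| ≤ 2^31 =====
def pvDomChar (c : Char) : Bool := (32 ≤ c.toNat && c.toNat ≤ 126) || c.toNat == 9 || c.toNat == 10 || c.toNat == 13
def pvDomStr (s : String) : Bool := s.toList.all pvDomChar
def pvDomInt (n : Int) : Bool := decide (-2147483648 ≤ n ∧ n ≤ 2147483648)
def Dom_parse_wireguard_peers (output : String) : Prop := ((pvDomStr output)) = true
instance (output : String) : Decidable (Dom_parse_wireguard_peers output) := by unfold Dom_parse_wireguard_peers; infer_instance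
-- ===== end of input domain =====

-- B replaces A's flag-and-accumulator loop by three separate phases (skip to first
-- "peer:", partition into blocks, map each block to a dict); objective: simpler.


-- ===== PORT A =====
-- line.split(":", 1) as the pair (head, tail); every use site has ":" in line, so the
-- fallback second component is never read.
def pvSplit1 (line : String) : String × String :=
  match PySem.Str.splitMax? line ":" 1 with
  | some (a :: b :: _) => (a, b)
  | _ => (line, "")

-- loop body after 'line = line.strip()' (state: peers, current_peer, skip_interface)
def pvStepA' (st : List (PySem.Dict String String) × PySem.Dict String String × Bool)
    (line : String) : List (PySem.Dict String String) × PySem.Dict String String × Bool :=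
  match st with
  | (peers, cur, skip) =>
    if skip && !(PySem.Str.startswith line "peer:") then (peers, cur, skip)  -- continue
    else if PySem.Str.startswith line "peer:" then
      ((if cur.items = [] then peers else peers ++ [cur]),
       PySem.Dict.mk [("public_key", PySem.Str.strip (pvSplit1 line).2)], false)
    else if PySem.Str.isIn ":" line then
      (peers, cur.insert (PySem.Str.strip (pvSplit1 line).1) (PySem.Str.strip (pvSplit1 line).2), false)
    else (peers, cur, false)

def pvStepA (st : List (PySem.Dict String String) × PySem.Dict String String × Bool)
    (line : String) : List (PySem.Dict String String) × PySem.Dict String String × Bool :=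
  pvStepA' st (PySem.Str.strip line)

def parse_wireguard_peers (output : String) : List (List (String × String)) :=
  let lines := PySem.Str.splitlines (PySem.Str.strip output)
  let st := lines.foldl pvStepA ([], PySem.Dict.mk [], true)
  (if st.2.1.items = [] then st.1 else st.1 ++ [st.2.1]).map PySem.Dict.items

-- ===== PORT B =====
def pvIsPeer (l : String) : Bool := PySem.Str.startswith l "peer:"

-- phase 1: 'while lines and not lines[0].startswith("peer:"): lines = lines[1:]'
def pvSkipToPeer : List String → List String
  | [] => []
  | l :: rest => if pvIsPeer l then l :: rest else pvSkipToPeer rest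

-- phase 2: partition into blocks, each starting at a "peer:" line
def pvBlocks : List String → List (List String)
  | [] => []
  | l :: rest =>
    (l :: rest.takeWhile (fun x => !pvIsPeer x)) :: pvBlocks (rest.dropWhile (fun x => !pvIsPeer x))
  termination_by ls => ls.length
  decreasing_by
    simp only [List.length_cons]
    exact Nat.lt_succ_of_le (List.length_dropWhile_le _ _)

-- one body line added to the dict under construction
def pvAddLine (d : PySem.Dict String String) (ln : String) : PySem.Dict String String :=
  if PySem.Str.isIn ":" ln then
    d.insert (PySem.Str.strip (pvSplit1 ln).1) (PySem.Str.strip (pvSplit1 ln).2)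
  else d

-- phase 3: one block to its dict
def pvPeerDict (block : List String) : List (String × String) :=
  match block with
  | [] => []
  | first :: rest =>
    (rest.foldl pvAddLine (PySem.Dict.mk [("public_key", PySem.Str.strip (pvSplit1 first).2)])).items

def parse_wireguard_peers_alt (output : String) : List (List (String × String)) :=
  let lines := (PySem.Str.splitlines (PySem.Str.strip output)).map PySem.Str.strip
  (pvBlocks (pvSkipToPeer lines)).map pvPeerDict

-- ===== PRECONDITION & SPEC =====
def Spec_parse_wireguard_peers (output : String) (out : List (List (String × String))) : Prop := out = parse_wireguard_peers_alt output
instance (output : String) (out : List (List (String × String))) : Decidable (Spec_parse_wireguard_peers output out) := by unfold Spec_parse_wireguard_peers; infer_instance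

-- ===== CLAIM (what is proved, stated in full; the proofs are below) =====
def Claim_equal_parse_wireguard_peers : Prop := ∀ (output : String), Dom_parse_wireguard_peers output → Spec_parse_wireguard_peers output (parse_wireguard_peers output)

-- ===== LEMMAS AND PROOFS =====
theorem pvBlocks_cons (l : String) (rest : List String) :
    pvBlocks (l :: rest)
      = (l :: rest.takeWhile (fun x => !pvIsPeer x)) :: pvBlocks (rest.dropWhile (fun x => !pvIsPeer x)) := by
  rw [pvBlocks.eq_def]
-- A's final 'if current_peer: peers.append(current_peer)' plus the dict→items view
def pvFinish (st : List (PySem.Dict String String) × PySem.Dict String String × Bool) :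
    List (List (String × String)) :=
  (if st.2.1.items = [] then st.1 else st.1 ++ [st.2.1]).map PySem.Dict.items

theorem pv_foldl_strip (ls : List String)
    (init : List (PySem.Dict String String) × PySem.Dict String String × Bool) :
    ls.foldl pvStepA init = (ls.map PySem.Str.strip).foldl pvStepA' init := by
  rw [List.foldl_map]; rfl
theorem pv_items_insert_ne_nil (d : PySem.Dict String String) (k v : String) :
    (d.insert k v).items ≠ [] := by
  obtain ⟨l⟩ := d
  rw [PySem.Dict.items_insert]
  cases l with
  | nil => simp
  | cons h t => split <;> simp

-- phase-2/3 correspondence: A's loop with skip_interface cleared, versus blocks+dicts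
theorem pv_foldl_body (ls : List String) (peers : List (PySem.Dict String String))
    (cur : PySem.Dict String String) (hcur : cur.items ≠ []) :
    pvFinish (List.foldl pvStepA' (peers, cur, false) ls)
      = peers.map PySem.Dict.items
        ++ [((ls.takeWhile (fun x => !pvIsPeer x)).foldl pvAddLine cur).items]
        ++ (pvBlocks (ls.dropWhile (fun x => !pvIsPeer x))).map pvPeerDict := by
  induction ls generalizing peers cur with
  | nil => simp [pvFinish, hcur, pvBlocks]
  | cons l rest ih =>
    by_cases hp : pvIsPeer l = true
    · rw [List.foldl_cons,
        show pvStepA' (peers, cur, false) l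
            = (peers ++ [cur], PySem.Dict.mk [("public_key", PySem.Str.strip (pvSplit1 l).2)], false)
          by simp [pvIsPeer] at hp; simp [pvStepA', hp, hcur],
        ih _ _ (by simp)]
      simp only [List.takeWhile_cons, List.dropWhile_cons, hp, Bool.not_true, Bool.false_eq_true, if_false, List.foldl_nil]
      rw [pvBlocks_cons]
      simp [pvPeerDict]
    · have hcur' : (pvAddLine cur l).items ≠ [] := by
        unfold pvAddLine
        split
        · exact pv_items_insert_ne_nil _ _ _
        · exact hcur
      rw [List.foldl_cons,
        show pvStepA' (peers, cur, false) l = (peers, pvAddLine cur l, false)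
          by simp [pvIsPeer] at hp
             simp [pvStepA', pvAddLine, hp]
             split <;> rfl,
        ih _ _ hcur']
      simp [hp]

theorem pv_main (ls : List String) :
    pvFinish (List.foldl pvStepA' ([], PySem.Dict.mk [], true) ls)
      = (pvBlocks (pvSkipToPeer ls)).map pvPeerDict := by
  induction ls with
  | nil => simp [pvFinish, pvSkipToPeer, pvBlocks]
  | cons l rest ih =>
    by_cases hp : pvIsPeer l = true
    · rw [List.foldl_cons,
        show pvStepA' ([], PySem.Dict.mk [], true) l
            = ([], PySem.Dict.mk [("public_key", PySem.Str.strip (pvSplit1 l).2)], false)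
          by simp [pvIsPeer] at hp; simp [pvStepA', hp],
        pv_foldl_body rest [] _ (by simp),
        pvSkipToPeer, if_pos hp, pvBlocks_cons]
      simp [pvPeerDict]
    · rw [List.foldl_cons,
        show pvStepA' ([], PySem.Dict.mk [], true) l = ([], PySem.Dict.mk [], true)
          by simp [pvIsPeer] at hp; simp [pvStepA', hp],
        pvSkipToPeer, if_neg hp]
      exact ih

-- ===== VERDICT (by name: the statement is the Claim_ definition above) =====
theorem parse_wireguard_peers_spec : Claim_equal_parse_wireguard_peers := by
  intro output _
  show parse_wireguard_peers output = parse_wireguard_peers_alt output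
  show pvFinish ((PySem.Str.splitlines (PySem.Str.strip output)).foldl pvStepA ([], PySem.Dict.mk [], true)) = _
  rw [pv_foldl_strip]
  exact pv_main _
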